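-- pv_equiv track=rewrite | github.com/rmlockwood/FLExTrans | GenerateParses.py | add_affixes
-- ===== SOURCE A (Python) =====
-- import copy
--
-- def add_affixes(stemList, slotList):
--
--     # if we don't have any slots we don't do anything
--     if len(slotList) > 0:
--         # remove the first slot
--         curSlot = slotList.pop(0)
--
--         # make spare copies of the slots and stems
--         newSlotList = copy.deepcopy(slotList)
--         newStemList = copy.deepcopy(stemList)
--
--         # now that we have a copy of the stems, set it back to no stems
--         # this is because we keep building on stems without keeping the first set
--         # E.g. for stem+slot1+slot2, we want all combos where slot1 and slot2 are present
--         # process_slots takes care of slots missing in other iterations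
--         # if slot1=a,b and slot2=x,y we would expect stemax,stemay,stembx,stemby to result
--         stemList = []
--
--         # Loop through all stems in the list
--         for stem in newStemList: # stem is a tuple of two stems
--             # Loop through all affixes for the current slot we are adding
--             (prefix, mySlot) = curSlot
--             for afx in mySlot: # afx is the Gloss of an affix, wrapped in < >
--                 # Put prefixes before the stem+pos and suffixes after
--                 if prefix:
--                     stemList.append(afx+stem)
--                 else:
--                     stemList.append(stem+afx)
--
--         # Recursively call this routine to get the affixes for the next slot
--         # The list of slots is one less because we removed the first one
--         stemList = add_affixes(stemList, newSlotList)
--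
--     # return the inflections we just built. We can't pass by reference because we set stemList to [] above
--     return stemList
-- ===== SOURCE B (Python) =====
-- import copy
--
-- def add_affixes(stemList, slotList):
--     # Stem-centric: for each stem, enumerate depth-first the cartesian
--     # product of affix choices across all slots.
--     if not slotList:
--         return stemList
--     first = slotList.pop(0)                 # keep A's caller-visible mutation
--     slots = [first] + copy.deepcopy(slotList)
--     out = []
--     for stem in stemList:
--         out.extend(_apply_slots(stem, slots))
--     return out
--
-- def _apply_slots(stem, slots):
--     # all inflected forms of one stem using every slot, in slot order
--     if not slots:
--         return [stem]
--     (prefix, afxs) = slots[0]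
--     rest = slots[1:]
--     res = []
--     for afx in afxs:
--         res.extend(_apply_slots(afx + stem if prefix else stem + afx, rest))
--     return res
-- ===== Notes on version B (the rewrite author's own statement) =====
-- stated objective: alternative
-- what changed: Replaced A's breadth-first generation-by-generation rebuild of the whole stem list (with deepcopies at every recursion level) by a stem-centric depth-first recursion that enumerates, per stem, the cartesian product of affix choices over the slots; one pop(0) keeps the caller-visible mutation.
import Mathlib
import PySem

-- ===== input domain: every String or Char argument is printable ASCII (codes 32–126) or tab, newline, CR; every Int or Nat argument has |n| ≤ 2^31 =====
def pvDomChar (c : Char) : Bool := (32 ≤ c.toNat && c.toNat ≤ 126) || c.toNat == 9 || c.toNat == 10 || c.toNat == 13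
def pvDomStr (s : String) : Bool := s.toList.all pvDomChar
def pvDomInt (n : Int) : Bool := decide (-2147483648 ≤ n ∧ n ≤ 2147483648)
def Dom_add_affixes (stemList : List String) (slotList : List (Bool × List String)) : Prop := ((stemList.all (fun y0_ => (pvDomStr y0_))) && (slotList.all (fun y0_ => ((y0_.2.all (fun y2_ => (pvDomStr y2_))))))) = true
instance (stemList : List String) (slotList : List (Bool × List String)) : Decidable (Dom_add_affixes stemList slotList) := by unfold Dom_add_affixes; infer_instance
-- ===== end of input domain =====

-- ===== PORT A =====
-- B replaces A's breadth-first generation-by-generation rebuild with a stem-centric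
-- depth-first enumeration of affix combinations ('alternative' objective, same cost).
-- Note: the Python A pops slotList's first element in place and B reproduces that
-- mutation; this file proves equality of the RETURN value.
def add_affixes (stemList : List String) (slotList : List (Bool × List String)) : List String :=
  match slotList with
  | [] => stemList
  | curSlot :: newSlotList =>
    let newStemList := stemList
    let stemList' :=
      newStemList.foldl (fun acc stem =>
        curSlot.2.foldl (fun acc2 afx =>
          acc2 ++ [if curSlot.1 then afx ++ stem else stem ++ afx]) acc) []
    add_affixes stemList' newSlotList

-- ===== PORT B =====
-- all inflected forms of one stem using every slot, in slot order (depth-first)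
def applySlots (stem : String) (slots : List (Bool × List String)) : List String :=
  match slots with
  | [] => [stem]
  | (pre, afxs) :: rest =>
    afxs.foldl (fun res afx =>
      res ++ applySlots (if pre then afx ++ stem else stem ++ afx) rest) []

def add_affixes_alt (stemList : List String) (slotList : List (Bool × List String)) : List String :=
  match slotList with
  | [] => stemList
  | first :: rest =>
    stemList.foldl (fun out stem => out ++ applySlots stem (first :: rest)) []

-- ===== PRECONDITION & SPEC =====
def Spec_add_affixes (stemList : List String) (slotList : List (Bool × List String)) (out : List String) : Prop := out = add_affixes_alt stemList slotList
instance (stemList : List String) (slotList : List (Bool × List String)) (out : List String) : Decidable (Spec_add_affixes stemList slotList out) := by unfold Spec_add_affixes; infer_instance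

-- ===== CLAIM =====
def Claim_equal_add_affixes : Prop := ∀ (stemList : List String) (slotList : List (Bool × List String)), Dom_add_affixes stemList slotList → Spec_add_affixes stemList slotList (add_affixes stemList slotList)

-- ===== LEMMAS AND PROOFS =====

-- fold-with-append is flatMap (used for both ports' loops)
theorem foldl_append_flatMap {α β : Type} (f : α → List β) (xs : List α) (acc : List β) :
    xs.foldl (fun r x => r ++ f x) acc = acc ++ xs.flatMap f := by
  induction xs generalizing acc with
  | nil => simp
  | cons x t ih => simp [List.foldl, ih]

-- inner loop over affixes of port A: appending singletons is map
theorem afx_foldl (f : String → String) (afxs : List String) (acc : List String) :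
    afxs.foldl (fun acc2 afx => acc2 ++ [f afx]) acc = acc ++ afxs.map f := by
  induction afxs generalizing acc with
  | nil => simp
  | cons a t ih => simp [List.foldl, ih]

-- one generation of A as a flatMap/map step
theorem step_eq (cur : Bool × List String) (stems : List String) (acc : List String) :
    stems.foldl (fun acc stem =>
      cur.2.foldl (fun acc2 afx =>
        acc2 ++ [if cur.1 then afx ++ stem else stem ++ afx]) acc) acc
    = acc ++ stems.flatMap (fun stem =>
        cur.2.map (fun afx => if cur.1 then afx ++ stem else stem ++ afx)) := by
  induction stems generalizing acc with
  | nil => simp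
  | cons s t ih => rw [List.foldl_cons, afx_foldl, ih, List.flatMap_cons, List.append_assoc]

-- applySlots unfolds to a flatMap over the first slot's affixes
theorem applySlots_cons (cur : Bool × List String) (rest : List (Bool × List String)) (stem : String) :
    applySlots stem (cur :: rest)
    = (cur.2.map (fun afx => if cur.1 then afx ++ stem else stem ++ afx)).flatMap
        (fun ns => applySlots ns rest) := by
  obtain ⟨pre, afxs⟩ := cur
  show afxs.foldl _ [] = _
  rw [foldl_append_flatMap, List.flatMap_map, List.nil_append]

-- main invariant: A's result is the flatMap of per-stem depth-first enumeration
theorem add_affixes_eq_flatMap (slotList : List (Bool × List String)) (stemList : List String) :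
    add_affixes stemList slotList = stemList.flatMap (fun s => applySlots s slotList) := by
  induction slotList generalizing stemList with
  | nil => simp [add_affixes, applySlots]
  | cons cur rest ih =>
    rw [add_affixes, ih, step_eq, List.nil_append, List.flatMap_assoc]
    refine List.flatMap_congr (fun s _ => ?_)
    rw [applySlots_cons]

theorem add_affixes_spec : Claim_equal_add_affixes := by
  intro stemList slotList _
  unfold Spec_add_affixes
  cases slotList with
  | nil => simp [add_affixes, add_affixes_alt]
  | cons first rest =>
    show _ = List.foldl _ [] stemList
    rw [add_affixes_eq_flatMap, foldl_append_flatMap, List.nil_append]
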